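-- pv_equiv track=rewrite | github.com/kurochin143/Algorithms | making_change/making_change.py | is_in_combs
-- ===== SOURCE A (Python) =====
-- def is_in_combs(denominations, combs):
--   for c in combs:
--     c_copy = c.copy()
--     for d in denominations:
--
--       for cc_i in range(len(c_copy)):
--         if c_copy[cc_i] == d:
--           c_copy.pop(cc_i)
--           break
--
--     if len(c_copy) == 0:
--       return True
--
--   return False
-- ===== SOURCE B (Python) =====
-- def is_in_combs(denominations, combs):
--     return any(
--         all(c.count(x) <= denominations.count(x) for x in set(c))
--         for c in combs
--     )
-- ===== Notes on version B (the rewrite author's own statement) =====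
-- stated objective: faster
-- what changed: Replaces A's destructive copy/scan/pop removal loop (a pass over the whole comb for every denomination, plus O(n) pop) with a direct sub-multiset test comparing element counts of each comb against the denominations, with short-circuiting any/all.
import Mathlib
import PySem

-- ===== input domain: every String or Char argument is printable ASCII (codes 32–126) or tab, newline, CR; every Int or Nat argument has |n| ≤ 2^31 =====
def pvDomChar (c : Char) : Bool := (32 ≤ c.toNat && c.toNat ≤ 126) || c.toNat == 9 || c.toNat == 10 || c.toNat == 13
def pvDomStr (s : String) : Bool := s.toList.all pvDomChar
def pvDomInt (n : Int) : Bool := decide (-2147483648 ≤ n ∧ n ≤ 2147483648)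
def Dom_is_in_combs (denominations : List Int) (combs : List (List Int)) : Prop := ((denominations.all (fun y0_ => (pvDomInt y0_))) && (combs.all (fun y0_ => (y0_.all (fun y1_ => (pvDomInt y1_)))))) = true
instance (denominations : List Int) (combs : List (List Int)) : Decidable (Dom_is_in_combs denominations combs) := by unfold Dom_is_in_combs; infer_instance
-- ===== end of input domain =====

-- B replaces A's destructive copy/scan/pop removal loop by a direct count comparison
-- (each comb must be a sub-multiset of the denominations); objective: simpler/idiomatic.

-- ===== PORT A =====
-- the inner 'for cc_i in range(len(c_copy)): if c_copy[cc_i] == d: c_copy.pop(cc_i); break' scan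
def pvPopFirst : List Int → Int → List Int
  | [], _ => []
  | x :: xs, d => if x == d then xs else x :: pvPopFirst xs d

-- the outer 'for c in combs' loop with its early 'return True'
def pvALoop (denominations : List Int) : List (List Int) → Bool
  | [] => false
  | c :: rest =>
    let c_copy := denominations.foldl (fun cc d => pvPopFirst cc d) c
    if c_copy.length == 0 then true else pvALoop denominations rest

def is_in_combs (denominations : List Int) (combs : List (List Int)) : Bool :=
  pvALoop denominations combs

-- ===== PORT B =====
def is_in_combs_alt (denominations : List Int) (combs : List (List Int)) : Bool :=
  combs.any (fun c =>
    (PySem.Set.ofList c).all (fun x =>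
      decide (PySem.List.count c x ≤ PySem.List.count denominations x)))

-- ===== PRECONDITION & SPEC =====
def Spec_is_in_combs (denominations : List Int) (combs : List (List Int)) (out : Bool) : Prop := out = is_in_combs_alt denominations combs
instance (denominations : List Int) (combs : List (List Int)) (out : Bool) : Decidable (Spec_is_in_combs denominations combs out) := by unfold Spec_is_in_combs; infer_instance

-- ===== CLAIM (what is proved, stated in full; the proofs are below) =====
def Claim_equal_is_in_combs : Prop := ∀ (denominations : List Int) (combs : List (List Int)), Dom_is_in_combs denominations combs → Spec_is_in_combs denominations combs (is_in_combs denominations combs)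

-- ===== LEMMAS AND PROOFS =====

theorem pvPopFirst_eq_erase (l : List Int) (d : Int) : pvPopFirst l d = l.erase d := by
  induction l with
  | nil => rfl
  | cons x xs ih => simp [pvPopFirst, List.erase_cons, ih]

-- A's per-comb removal fold empties the comb iff every count in c is covered by denominations
theorem foldl_erase_eq_nil_iff (ds : List Int) (c : List Int) :
    (ds.foldl (fun cc d => pvPopFirst cc d) c = []) ↔ ∀ x, c.count x ≤ ds.count x := by
  induction ds generalizing c with
  | nil =>
    simp only [List.foldl_nil, List.count_nil, Nat.le_zero]
    constructor
    · rintro rfl x; simp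
    · intro h
      cases c with
      | nil => rfl
      | cons y ys => exact absurd (h y) (by simp [List.count_cons])
  | cons d ds ih =>
    rw [List.foldl_cons, ih, pvPopFirst_eq_erase]
    constructor
    · intro h x
      have := h x
      by_cases hx : x = d
      · subst hx
        simp [List.count_erase, List.count_cons] at this ⊢ <;> omega
      · have hx' : ¬ d = x := fun h' => hx h'.symm
        simp [List.count_erase, List.count_cons, hx, hx'] at this ⊢ <;> omega
    · intro h x
      have := h x
      by_cases hx : x = d
      · subst hx
        simp [List.count_erase, List.count_cons] at this ⊢ <;> omega
      · have hx' : ¬ d = x := fun h' => hx h'.symm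
        simp [List.count_erase, List.count_cons, hx, hx'] at this ⊢ <;> omega

-- B's per-comb test says the same thing
theorem alt_comb_iff (ds c : List Int) :
    ((PySem.Set.ofList c).all (fun x =>
      decide (PySem.List.count c x ≤ PySem.List.count ds x)) = true) ↔
    ∀ x, c.count x ≤ ds.count x := by
  simp only [List.all_eq_true, decide_eq_true_eq, PySem.List.count_eq]
  constructor
  · intro h x
    by_cases hx : x ∈ c
    · exact h x (by rw [PySem.Set.mem_ofList]; exact hx)
    · simp [List.count_eq_zero.mpr hx]
  · intro h x _
    exact h x

theorem main_eq (ds : List Int) (combs : List (List Int)) :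
    pvALoop ds combs = is_in_combs_alt ds combs := by
  induction combs with
  | nil => rfl
  | cons c rest ih =>
    simp only [pvALoop, is_in_combs_alt, List.any_cons]
    rw [show (rest.any (fun c =>
        (PySem.Set.ofList c).all (fun x =>
          decide (PySem.List.count c x ≤ PySem.List.count ds x)))) = is_in_combs_alt ds rest from rfl,
      ← ih]
    by_cases h : ds.foldl (fun cc d => pvPopFirst cc d) c = []
    · have hb : ((PySem.Set.ofList c).all (fun x =>
          decide (PySem.List.count c x ≤ PySem.List.count ds x))) = true :=
        (alt_comb_iff ds c).mpr ((foldl_erase_eq_nil_iff ds c).mp h)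
      have h0 : ((ds.foldl (fun cc d => pvPopFirst cc d) c).length == 0) = true := by
        simp [h]
      rw [hb, h0]
      simp
    · have hb : ((PySem.Set.ofList c).all (fun x =>
          decide (PySem.List.count c x ≤ PySem.List.count ds x))) = false := by
        rw [Bool.eq_false_iff]
        intro hc
        exact h ((foldl_erase_eq_nil_iff ds c).mpr ((alt_comb_iff ds c).mp hc))
      have h0 : ((ds.foldl (fun cc d => pvPopFirst cc d) c).length == 0) = false := by
        simp [List.length_eq_zero_iff, h]
      rw [hb, h0]
      simp

-- ===== VERDICT (by name: the statement is the Claim_ definition above) =====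
theorem is_in_combs_spec : Claim_equal_is_in_combs := by
  intro ds combs _
  unfold Spec_is_in_combs is_in_combs
  exact main_eq ds combs
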